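-- pv_equiv track=rewrite | github.com/ReiHakiri/Learning-computation | CLTM/actions.py | add_repeat
-- ===== SOURCE A (Python) =====
-- from itertools import product
--
-- def multi_to_state(line_n: int, intermediate: int, v_values: list[int], total_lines: int, v_bounds: list[int]) -> int:
--     result = line_n
--     radix = total_lines
--
--     result += intermediate * radix
--     radix *= 3
--
--     for v_value, v_bound in zip(v_values, v_bounds):
--         if v_value >= v_bound:
--             raise Exception('Variable value out of bounds')
--
--         result += v_value * radix
--         radix *= v_bound
--
--     return result
--
-- def all_v_values(v_bounds: list[int]) -> product:
--     result = []
--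
--     for v_bound in v_bounds:
--         result.append(range(v_bound))
--
--     return product(*result)
--
-- def add_repeat(transition_table: list[list[int]], line_n: int, total_symbols: int, total_lines: int, v_bounds: list[int]) -> list[list[tuple[int, int, int]]]:
--     for v_values in all_v_values(v_bounds):
--         state1 = multi_to_state(line_n, 0, v_values, total_lines, v_bounds)
--         state2 = multi_to_state(line_n, 1, v_values, total_lines, v_bounds)
--         state3 = multi_to_state(0, 0, v_values, total_lines, v_bounds) # Originally used v_values_0(v_bounds) instead of v_values
--
--         for symbol1 in range(total_symbols):
--             for symbol2 in range(total_symbols):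
--                 transition_table[symbol1][state1] = (symbol1, state2, 1)
--                 transition_table[symbol2][state2] = (symbol2, state3, -1)
--
--     return transition_table
-- ===== SOURCE B (Python) =====
-- def add_repeat(transition_table, line_n, total_symbols, total_lines, v_bounds):
--     # Enumerate the mixed-radix offsets of all variable-value combinations
--     # directly (in the same lexicographic order the original's product uses),
--     # instead of materialising value tuples and re-deriving each state with
--     # three multi_to_state calls; and fill the table with a SINGLE symbol
--     # loop: the original's quadratic symbol1 x symbol2 loop only ever writes
--     # cell [s][state1] and cell [s][state2] with values depending on s alone,
--     # so one linear pass produces the identical final table.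
--     if any(b <= 0 for b in v_bounds):
--         return transition_table  # some range is empty: no combinations, nothing to fill
--     offs = [0]
--     r = 3 * total_lines
--     for b in v_bounds:
--         offs = [o + v * r for o in offs for v in range(b)]
--         r *= b
--     for off in offs:
--         state1 = line_n + off
--         state2 = state1 + total_lines
--         for s in range(total_symbols):
--             transition_table[s][state1] = (s, state2, 1)
--             transition_table[s][state2] = (s, off, -1)
--     return transition_table
-- ===== Notes on version B (the rewrite author's own statement) =====
-- stated objective: faster
-- what changed: Replaces the nested symbol1 x symbol2 loop (whose two writes each depend on a single index) by one linear symbol pass, and replaces itertools.product plus three multi_to_state recomputations per combination by a direct enumeration of the mixed-radix state offsets.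
import Mathlib
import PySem

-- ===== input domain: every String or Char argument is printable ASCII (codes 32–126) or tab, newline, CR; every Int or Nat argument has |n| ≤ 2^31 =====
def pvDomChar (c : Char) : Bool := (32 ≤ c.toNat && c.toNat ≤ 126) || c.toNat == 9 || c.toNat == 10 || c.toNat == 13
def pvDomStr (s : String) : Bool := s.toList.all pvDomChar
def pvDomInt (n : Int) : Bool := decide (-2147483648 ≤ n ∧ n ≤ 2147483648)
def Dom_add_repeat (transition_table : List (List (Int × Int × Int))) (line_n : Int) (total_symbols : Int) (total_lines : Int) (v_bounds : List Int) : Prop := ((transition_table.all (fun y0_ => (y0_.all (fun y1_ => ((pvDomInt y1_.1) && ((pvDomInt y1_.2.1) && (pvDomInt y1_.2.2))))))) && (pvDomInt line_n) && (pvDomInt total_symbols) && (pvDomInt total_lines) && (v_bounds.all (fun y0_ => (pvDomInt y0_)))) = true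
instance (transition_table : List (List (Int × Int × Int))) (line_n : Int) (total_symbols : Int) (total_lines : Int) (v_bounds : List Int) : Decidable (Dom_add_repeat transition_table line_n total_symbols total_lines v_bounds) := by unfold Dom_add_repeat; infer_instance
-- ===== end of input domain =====

-- B replaces A's quadratic symbol1 × symbol2 write loop by one linear symbol loop (and three
-- multi_to_state recomputations per combination by one precomputed radix list); A mutates the
-- table it is given in place, so the equivalence proved here is about the RETURN value only.

-- pySet xs c v = Python's 'xs[c] = v' (negative index wraps once); out of range Python raises
-- IndexError — those inputs are excluded by Pre_, so here the write is a no-op there.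
def pyNormIdx (n : Nat) (c : Int) : Int := if c < 0 then c + n else c

def pySet {α : Type} (xs : List α) (c : Int) (v : α) : List α :=
  if 0 ≤ pyNormIdx xs.length c ∧ pyNormIdx xs.length c < (xs.length : Int)
  then xs.set (pyNormIdx xs.length c).toNat v
  else xs

-- 'table[s][c] = v' for a row index s that the loops only ever produce ≥ 0;
-- a missing row (Python IndexError, excluded by Pre_) is a no-op.
def setCell (t : List (List (Int × Int × Int))) (s c : Int) (v : Int × Int × Int) :
    List (List (Int × Int × Int)) :=
  if 0 ≤ s then t.modify s.toNat (fun r => pySet r c v) else t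

-- ===== PORT A =====
-- multi_to_state; its 'Variable value out of bounds' raise is unreachable from add_repeat
-- (every v_value is drawn from range(v_bound)), so it is not modelled.
def multi_to_state_port (line_n intermediate : Int) (v_values : List Int) (total_lines : Int)
    (v_bounds : List Int) : Int :=
  let result := line_n
  let radix := total_lines
  let result := result + intermediate * radix
  let radix := radix * 3
  ((v_values.zip v_bounds).foldl
    (fun (st : Int × Int) (p : Int × Int) => (st.1 + p.1 * st.2, st.2 * p.2)) (result, radix)).1

-- all_v_values: itertools.product of the ranges, first factor slowest
def all_v_values_port : List Int → List (List Int)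
  | [] => [[]]
  | b :: rest =>
      let sub := all_v_values_port rest
      (PySem.List.pyRange 0 b 1).flatMap (fun v => sub.map (v :: ·))

def add_repeat (transition_table : List (List (Int × Int × Int))) (line_n : Int)
    (total_symbols : Int) (total_lines : Int) (v_bounds : List Int) :
    List (List (Int × Int × Int)) :=
  (all_v_values_port v_bounds).foldl (fun t vv =>
      let state1 := multi_to_state_port line_n 0 vv total_lines v_bounds
      let state2 := multi_to_state_port line_n 1 vv total_lines v_bounds
      let state3 := multi_to_state_port 0 0 vv total_lines v_bounds
      (PySem.List.pyRange 0 total_symbols 1).foldl (fun t symbol1 =>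
        (PySem.List.pyRange 0 total_symbols 1).foldl (fun t symbol2 =>
          setCell (setCell t symbol1 state1 (symbol1, state2, 1)) symbol2 state2 (symbol2, state3, -1))
          t) t)
    transition_table

-- ===== PORT B =====
def add_repeat_alt (transition_table : List (List (Int × Int × Int))) (line_n : Int)
    (total_symbols : Int) (total_lines : Int) (v_bounds : List Int) :
    List (List (Int × Int × Int)) :=
  if v_bounds.any (fun b => decide (b ≤ 0)) then transition_table else
  let p := v_bounds.foldl
      (fun (p : List Int × Int) (b : Int) =>
        (p.1.flatMap (fun o => (PySem.List.pyRange 0 b 1).map (fun v => o + v * p.2)), p.2 * b))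
      ([0], 3 * total_lines)
  p.1.foldl (fun t off =>
      let state1 := line_n + off
      let state2 := state1 + total_lines
      (PySem.List.pyRange 0 total_symbols 1).foldl (fun t s =>
        setCell (setCell t s state1 (s, state2, 1)) s state2 (s, off, -1)) t)
    transition_table

-- ===== PRECONDITION & SPEC =====
-- (lo, hi) of the offsets Σ v_i·r_i over all v_i ∈ range(b_i), mixed-radix weights from r
def pvSpan (r : Int) : List Int → Int × Int
  | [] => (0, 0)
  | b :: rest =>
      let p := pvSpan (r * b) rest
      (p.1 + min 0 ((b - 1) * r), p.2 + max 0 ((b - 1) * r))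

-- Pre_ = exactly the inputs on which Python A returns (no IndexError): either no write happens
-- (no symbol, or an empty range empties the product), or every written cell exists — each of the
-- first total_symbols rows is long enough for the extreme target columns (negative indices wrap).
def Pre_add_repeat (transition_table : List (List (Int × Int × Int))) (line_n : Int)
    (total_symbols : Int) (total_lines : Int) (v_bounds : List Int) : Prop :=
  total_symbols ≤ 0 ∨ (∃ b ∈ v_bounds, b ≤ 0) ∨
  (total_symbols ≤ (transition_table.length : Int) ∧
   ∀ row ∈ transition_table.take total_symbols.toNat,
     -(row.length : Int) ≤ line_n + (pvSpan (3 * total_lines) v_bounds).1 + min 0 total_lines ∧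
     line_n + (pvSpan (3 * total_lines) v_bounds).2 + max 0 total_lines < (row.length : Int))

instance (transition_table : List (List (Int × Int × Int))) (line_n : Int) (total_symbols : Int) (total_lines : Int) (v_bounds : List Int) : Decidable (Pre_add_repeat transition_table line_n total_symbols total_lines v_bounds) := by
  unfold Pre_add_repeat; infer_instance

def pvWitness_add_repeat : (List (List (Int × Int × Int))) × Int × Int × Int × List Int :=
  ([[(0, 0, 0), (0, 0, 0)]], 0, 1, 1, [])

def Spec_add_repeat (transition_table : List (List (Int × Int × Int))) (line_n : Int) (total_symbols : Int) (total_lines : Int) (v_bounds : List Int) (out : List (List (Int × Int × Int))) : Prop := out = add_repeat_alt transition_table line_n total_symbols total_lines v_bounds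
instance (transition_table : List (List (Int × Int × Int))) (line_n : Int) (total_symbols : Int) (total_lines : Int) (v_bounds : List Int) (out : List (List (Int × Int × Int))) : Decidable (Spec_add_repeat transition_table line_n total_symbols total_lines v_bounds out) := by unfold Spec_add_repeat; infer_instance

-- ===== CLAIM (what is proved, stated in full; the proofs are below) =====
def Claim_equal_add_repeat : Prop := ∀ (transition_table : List (List (Int × Int × Int))) (line_n : Int) (total_symbols : Int) (total_lines : Int) (v_bounds : List Int), Dom_add_repeat transition_table line_n total_symbols total_lines v_bounds → Pre_add_repeat transition_table line_n total_symbols total_lines v_bounds → Spec_add_repeat transition_table line_n total_symbols total_lines v_bounds (add_repeat transition_table line_n total_symbols total_lines v_bounds)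

-- ===== LEMMAS AND PROOFS =====

theorem pySet_of_pos {α : Type} (xs : List α) (c : Int) (v : α)
    (h : 0 ≤ pyNormIdx xs.length c ∧ pyNormIdx xs.length c < (xs.length : Int)) :
    pySet xs c v = xs.set (pyNormIdx xs.length c).toNat v := by
  unfold pySet; rw [if_pos h]

theorem pySet_of_neg {α : Type} (xs : List α) (c : Int) (v : α)
    (h : ¬ (0 ≤ pyNormIdx xs.length c ∧ pyNormIdx xs.length c < (xs.length : Int))) :
    pySet xs c v = xs := by
  unfold pySet; rw [if_neg h]

-- overwrite: same target cell, second write wins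
theorem pySet_pySet_same {α : Type} (r : List α) (c : Int) (v w : α) :
    pySet (pySet r c v) c w = pySet r c w := by
  by_cases h : 0 ≤ pyNormIdx r.length c ∧ pyNormIdx r.length c < (r.length : Int)
  · have h' : 0 ≤ pyNormIdx (r.set (pyNormIdx r.length c).toNat v).length c ∧
        pyNormIdx (r.set (pyNormIdx r.length c).toNat v).length c <
          ((r.set (pyNormIdx r.length c).toNat v).length : Int) := by
      simpa using h
    rw [pySet_of_pos r c v h, pySet_of_pos _ c w h', pySet_of_pos r c w h]
    simp only [List.length_set, List.set_set]
  · rw [pySet_of_neg r c v h]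

-- the 'g f g = g f' collapse used for the nested loop
theorem pySet_gfg {α : Type} (r : List α) (c1 c2 : Int) (v w : α) :
    pySet (pySet (pySet r c2 w) c1 v) c2 w = pySet (pySet r c1 v) c2 w := by
  by_cases h2 : 0 ≤ pyNormIdx r.length c2 ∧ pyNormIdx r.length c2 < (r.length : Int)
  · by_cases h1 : 0 ≤ pyNormIdx r.length c1 ∧ pyNormIdx r.length c1 < (r.length : Int)
    · -- all four writes are real; lengths never change, so the normalized indices never change
      rw [pySet_of_pos r c2 w h2, pySet_of_pos _ c1 v (by simpa using h1),
          pySet_of_pos _ c2 w (by simpa using h2), pySet_of_pos r c1 v h1,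
          pySet_of_pos _ c2 w (by simpa using h2)]
      simp only [List.length_set]
      by_cases he : pyNormIdx r.length c1 = pyNormIdx r.length c2
      · rw [he]; simp only [List.set_set]
      · have hne : (pyNormIdx r.length c2).toNat ≠ (pyNormIdx r.length c1).toNat := by
          have := h1.1; have := h2.1; omega
        rw [List.set_comm w v hne, List.set_set]
    · rw [pySet_of_pos r c2 w h2,
          pySet_of_neg _ c1 v (by simpa using h1),
          pySet_of_neg r c1 v h1,
          pySet_of_pos _ c2 w (by simpa using h2),
          pySet_of_pos r c2 w h2]
      simp only [List.length_set, List.set_set]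
  · rw [pySet_of_neg r c2 w h2]

-- one Python cell write, seen through row j
theorem getElem?_setCell (t : List (List (Int × Int × Int))) (s c : Int) (v : Int × Int × Int)
    (j : Nat) :
    (setCell t s c v)[j]? =
      if s = (j : Int) then t[j]?.map (fun r => pySet r c v) else t[j]? := by
  unfold setCell
  by_cases hs : 0 ≤ s
  · simp only [hs, if_true, List.getElem?_modify]
    by_cases hj : s = (j : Int)
    · have hn : s.toNat = j := by omega
      cases t[j]? <;> simp [hj]
    · have hn : ¬ s.toNat = j := by omega
      cases t[j]? <;> simp [hj, hn]
  · have hj : ¬ s = (j : Int) := by omega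
    simp [hs, hj]

-- a foldl over tables, seen through row j
theorem getElem?_foldl {α β : Type} (step : List α → β → List α) (rstep : Option α → β → Option α)
    (j : Nat) (h : ∀ t a, (step t a)[j]? = rstep t[j]? a) :
    ∀ (L : List β) (t : List α), (L.foldl step t)[j]? = L.foldl rstep t[j]? := by
  intro L
  induction L with
  | nil => intro t; rfl
  | cons x xs ih => intro t; simp only [List.foldl_cons, ih, h]

-- ---- abstract one-row algebra: f = the c1 write, g = the c2 write of one symbol row ----

-- a loop whose only action is an idempotent h at the occurrences of j
theorem foldl_if_idem {β : Type} (h : β → β) (j : Int) (hh : ∀ x, h (h x) = h x) :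
    ∀ (L : List Int) (x : β),
      L.foldl (fun x b => if b = j then h x else x) x = if j ∈ L then h x else x := by
  intro L
  induction L with
  | nil => intro x; simp
  | cons a M ih =>
      intro x
      by_cases ha : a = j
      · subst ha
        simp only [List.foldl_cons, ite_true, ih, List.mem_cons, true_or]
        by_cases hm : a ∈ M <;> simp [hm, hh]
      · have : ¬ j = a := fun h' => ha h'.symm
        simp [List.foldl_cons, ha, ih, List.mem_cons, this]

-- inner pass at symbol1 = j: each step applies f, and g (f ·) at b = j
theorem inner_absorb {β : Type} (f g : β → β) (j : Int)
    (hff : ∀ x, f (f x) = f x) (hgfg : ∀ x, g (f (g x)) = g (f x)) :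
    ∀ (M : List Int) (x : β),
      g (f (M.foldl (fun x b => if b = j then g (f x) else f x) x)) = g (f x) := by
  intro M
  induction M using List.reverseRecOn with
  | nil => intro x; rfl
  | append_singleton M a ih =>
      intro x
      by_cases ha : a = j <;>
        simp only [List.foldl_append, List.foldl_cons, List.foldl_nil, ha, ite_true, ite_false]
      · rw [hgfg, hff, ih]
      · rw [hff, ih]

theorem inner_head_g {β : Type} (f g : β → β) (j : Int)
    (hff : ∀ x, f (f x) = f x) (hgg : ∀ x, g (g x) = g x) (hgfg : ∀ x, g (f (g x)) = g (f x)) :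
    ∀ (L : List Int), L ≠ [] → ∀ (x : β),
      g (L.foldl (fun x b => if b = j then g (f x) else f x) x) = g (f x) := by
  intro L
  induction L using List.reverseRecOn with
  | nil => intro h; exact absurd rfl h
  | append_singleton M a _ =>
      intro _ x
      by_cases ha : a = j <;>
        simp only [List.foldl_append, List.foldl_cons, List.foldl_nil, ha, ite_true, ite_false]
      · rw [hgg, inner_absorb f g j hff hgfg]
      · have := inner_absorb f g j hff hgfg M x
        exact this

-- outer loop (K = the full symbol list, containing j): a ≠ j contributes g, a = j the inner pass
theorem outer_absorb {β : Type} (f g : β → β) (j : Int) (K : List Int)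
    (hff : ∀ x, f (f x) = f x) (hgfg : ∀ x, g (f (g x)) = g (f x)) :
    ∀ (M : List Int) (x : β),
      g (f (M.foldl (fun x a => if a = j
          then K.foldl (fun x b => if b = j then g (f x) else f x) x
          else g x) x)) = g (f x) := by
  intro M
  induction M using List.reverseRecOn with
  | nil => intro x; rfl
  | append_singleton M a ih =>
      intro x
      by_cases ha : a = j <;>
        simp only [List.foldl_append, List.foldl_cons, List.foldl_nil, ha, ite_true, ite_false]
      · rw [inner_absorb f g j hff hgfg, ih]
      · rw [hgfg, ih]

theorem outer_mem_g {β : Type} (f g : β → β) (j : Int) (K : List Int)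
    (hff : ∀ x, f (f x) = f x) (hgg : ∀ x, g (g x) = g x) (hgfg : ∀ x, g (f (g x)) = g (f x))
    (hK : K ≠ []) :
    ∀ (M : List Int), j ∈ M → ∀ (x : β),
      g (M.foldl (fun x a => if a = j
          then K.foldl (fun x b => if b = j then g (f x) else f x) x
          else g x) x) = g (f x) := by
  intro M
  induction M using List.reverseRecOn with
  | nil => intro h; exact absurd h (List.not_mem_nil)
  | append_singleton M a ih =>
      intro hm x
      by_cases ha : a = j <;>
        simp only [List.foldl_append, List.foldl_cons, List.foldl_nil, ha, ite_true, ite_false]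
      · rw [inner_head_g f g j hff hgg hgfg K hK, outer_absorb f g j K hff hgfg]
      · have hjM : j ∈ M := by
          rcases List.mem_append.mp hm with h | h
          · exact h
          · exact absurd (List.mem_singleton.mp h).symm ha
        rw [hgg, ih hjM]

-- the whole nested pass over row j equals g (f ·) whenever j occurs in the symbol list
theorem outer_full {β : Type} (f g : β → β) (j : Int) (K : List Int)
    (hff : ∀ x, f (f x) = f x) (hgg : ∀ x, g (g x) = g x) (hgfg : ∀ x, g (f (g x)) = g (f x))
    (hj : j ∈ K) :
    ∀ (x : β),
      K.foldl (fun x a => if a = j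
          then K.foldl (fun x b => if b = j then g (f x) else f x) x
          else g x) x = g (f x) := by
  have hK : K ≠ [] := List.ne_nil_of_mem hj
  rcases List.eq_nil_or_concat K with rfl | ⟨M, a, rfl⟩
  · exact absurd hj (List.not_mem_nil)
  · simp only [List.concat_eq_append] at hj hK ⊢
    intro x
    by_cases ha : a = j
    · subst ha
      rw [List.foldl_append]
      simp only [List.foldl_cons, List.foldl_nil, ite_true]
      rw [List.foldl_append]
      simp only [List.foldl_cons, List.foldl_nil, ite_true]
      rw [inner_absorb f g a hff hgfg, outer_absorb f g a (M ++ [a]) hff hgfg]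
    · have hjM : j ∈ M := by
        rcases List.mem_append.mp hj with h | h
        · exact h
        · exact absurd (List.mem_singleton.mp h).symm ha
      rw [List.foldl_append]
      simp only [List.foldl_cons, List.foldl_nil, ha, ite_false]
      exact outer_mem_g f g j (M ++ [a]) hff hgg hgfg hK M hjM x

-- one row of A's nested symbol loop = one row of B's single symbol loop
theorem rowAB {β : Type} (f g : β → β) (j : Int)
    (hff : ∀ x, f (f x) = f x) (hgg : ∀ x, g (g x) = g x) (hgfg : ∀ x, g (f (g x)) = g (f x)) :
    ∀ (L : List Int) (x : β),
      L.foldl (fun x a => L.foldl (fun x b =>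
          if b = j then g (if a = j then f x else x) else (if a = j then f x else x)) x) x
      = L.foldl (fun x s => if s = j then g (f x) else x) x := by
  intro L x
  have hgf : ∀ y : β, g (f (g (f y))) = g (f y) := by
    intro y; rw [hgfg (f y), hff]
  by_cases hj : j ∈ L
  · have hstep : (fun (x : β) (a : Int) => L.foldl (fun x b =>
        if b = j then g (if a = j then f x else x) else (if a = j then f x else x)) x)
        = fun (x : β) (a : Int) => if a = j
            then L.foldl (fun x b => if b = j then g (f x) else f x) x
            else g x := by
      funext x a
      by_cases ha : a = j
      · simp only [ha, ite_true]
      · simp only [ha, ite_false]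
        rw [foldl_if_idem g j hgg L x, if_pos hj]
    rw [hstep, outer_full f g j L hff hgg hgfg hj,
        foldl_if_idem (fun y => g (f y)) j hgf L x, if_pos hj]
  · rw [foldl_if_idem (fun y => g (f y)) j hgf L x, if_neg hj]
    rw [PySem.List.foldl_congr_mem L _ (fun (x : β) (_ : Int) => x) x ?_, List.foldl_fixed]
    intro x a ha
    have hane : a ≠ j := fun h => hj (h ▸ ha)
    simp only [hane, ite_false]
    rw [foldl_if_idem g j hgg L x, if_neg hj]

-- table level: the nested symbol1 × symbol2 pass equals the single symbol pass
theorem core_table (L : List Int) (c1 c2 : Int) (F G : Int → Int × Int × Int)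
    (t : List (List (Int × Int × Int))) :
    L.foldl (fun t a => L.foldl (fun t b =>
        setCell (setCell t a c1 (F a)) b c2 (G b)) t) t
    = L.foldl (fun t s => setCell (setCell t s c1 (F s)) s c2 (G s)) t := by
  apply List.ext_getElem?_iff.mpr
  intro j
  have hcell : ∀ (t : List (List (Int × Int × Int))) (a b : Int),
      (setCell (setCell t a c1 (F a)) b c2 (G b))[j]? =
        (fun (o : Option (List (Int × Int × Int))) (b : Int) =>
          if b = (j : Int) then (o.map (fun r => pySet r c2 (G j)))
          else o)
        ((fun (o : Option (List (Int × Int × Int))) (a : Int) =>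
          if a = (j : Int) then (o.map (fun r => pySet r c1 (F j))) else o) t[j]? a) b := by
    intro t a b
    rw [getElem?_setCell, getElem?_setCell]
    by_cases ha : a = (j : Int) <;> by_cases hb : b = (j : Int) <;>
      simp only [ha, hb, ite_true, ite_false]
  have hrowA : (L.foldl (fun t a => L.foldl (fun t b =>
      setCell (setCell t a c1 (F a)) b c2 (G b)) t) t)[j]? =
      L.foldl (fun o a => L.foldl (fun o b =>
        if b = (j : Int) then ((if a = (j : Int) then o.map (fun r => pySet r c1 (F j)) else o).map
          (fun r => pySet r c2 (G j)))
        else (if a = (j : Int) then o.map (fun r => pySet r c1 (F j)) else o)) o) t[j]? := by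
    apply getElem?_foldl _ _ j
    intro t a
    apply getElem?_foldl _ _ j
    intro t b
    exact hcell t a b
  have hrowB : (L.foldl (fun t s => setCell (setCell t s c1 (F s)) s c2 (G s)) t)[j]? =
      L.foldl (fun o s => if s = (j : Int)
          then (o.map (fun r => pySet r c1 (F j))).map (fun r => pySet r c2 (G j)) else o) t[j]? := by
    apply getElem?_foldl _ _ j
    intro t s
    rw [hcell]
    by_cases hs : s = (j : Int) <;> simp only [hs, ite_true, ite_false]
  rw [hrowA, hrowB]
  have := rowAB (β := Option (List (Int × Int × Int)))
      (Option.map (fun r => pySet r c1 (F j))) (Option.map (fun r => pySet r c2 (G j))) (j : Int)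
      (by intro o; cases o <;> simp [pySet_pySet_same])
      (by intro o; cases o <;> simp [pySet_pySet_same])
      (by intro o; cases o <;> simp [pySet_gfg])
      L t[j]?
  simpa using this

-- proof-side devices: the weight list of the mixed radix and the offset of one value tuple
def radicesB (r : Int) : List Int → List Int
  | [] => []
  | b :: rest => r :: radicesB (r * b) rest

def offSumB (vv rad : List Int) : Int :=
  (vv.zip rad).foldl (fun a p => a + p.1 * p.2) 0

theorem offSum_cons (v w : Int) (vv rest : List Int) :
    offSumB (v :: vv) (w :: rest) = v * w + offSumB vv rest := by
  simp only [offSumB, List.zip_cons_cons, List.foldl_cons, PySem.List.foldl_add]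
  ring

-- B's offset enumeration = A's tuple enumeration, summed against the weight list
theorem offs_spec : ∀ (bs : List Int) (offs0 : List Int) (r : Int),
    (bs.foldl (fun (p : List Int × Int) (b : Int) =>
        (p.1.flatMap (fun o => (PySem.List.pyRange 0 b 1).map (fun v => o + v * p.2)), p.2 * b))
      (offs0, r)).1
    = offs0.flatMap (fun o => (all_v_values_port bs).map (fun vv => o + offSumB vv (radicesB r bs))) := by
  intro bs
  induction bs with
  | nil =>
      intro offs0 r
      simp [all_v_values_port, offSumB]
  | cons b bs ih =>
      intro offs0 r
      simp only [List.foldl_cons]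
      rw [ih]
      simp only [all_v_values_port, radicesB, List.flatMap_assoc, List.flatMap_map,
        List.map_flatMap, List.map_map, Function.comp_def, offSum_cons, add_assoc]

-- multi_to_state's running (result, radix) pair, in closed form over the weight list
theorem multi_fold_closed : ∀ (vv bs : List Int) (res rad : Int),
    ((vv.zip bs).foldl (fun (st : Int × Int) (p : Int × Int) => (st.1 + p.1 * st.2, st.2 * p.2))
      (res, rad)).1 = res + offSumB vv (radicesB rad bs) := by
  intro vv
  induction vv with
  | nil => intro bs res rad; simp [offSumB]
  | cons v vs ih =>
      intro bs res rad
      cases bs with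
      | nil => simp [offSumB, radicesB]
      | cons b bs' =>
          simp only [radicesB, List.zip_cons_cons, List.foldl_cons]
          rw [ih bs' (res + v * rad) (rad * b)]
          simp only [offSumB, List.zip_cons_cons, List.foldl_cons, PySem.List.foldl_add]
          ring

theorem multi_closed (line_n intermediate : Int) (vv : List Int) (total_lines : Int)
    (bs : List Int) :
    multi_to_state_port line_n intermediate vv total_lines bs =
      line_n + intermediate * total_lines + offSumB vv (radicesB (3 * total_lines) bs) := by
  unfold multi_to_state_port
  rw [multi_fold_closed]
  ring_nf

-- an empty range empties the whole product
theorem all_v_values_empty : ∀ (bs : List Int), (∃ b ∈ bs, b ≤ 0) → all_v_values_port bs = [] := by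
  intro bs
  induction bs with
  | nil => intro h; exact absurd h (by simp)
  | cons b rest ih =>
      intro h
      by_cases hb : b ≤ 0
      · simp [all_v_values_port, PySem.List.pyRange_one_eq_nil hb]
      · have : ∃ x ∈ rest, x ≤ 0 := by
          rcases h with ⟨x, hx, hx0⟩
          rcases List.mem_cons.mp hx with rfl | hx'
          · exact absurd hx0 hb
          · exact ⟨x, hx', hx0⟩
        simp [all_v_values_port, ih this]

-- A's whole fold equals B's whole fold
theorem add_eq (tt : List (List (Int × Int × Int))) (ln ts tl : Int) (vb : List Int) :
    add_repeat tt ln ts tl vb = add_repeat_alt tt ln ts tl vb := by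
  unfold add_repeat add_repeat_alt
  by_cases hz : vb.any (fun b => decide (b ≤ 0)) = true
  · rw [if_pos hz, all_v_values_empty vb (by simpa using List.any_eq_true.mp hz), List.foldl_nil]
  · rw [if_neg hz]
    dsimp only []
    rw [offs_spec]
    simp only [List.flatMap_cons, List.flatMap_nil, List.append_nil, zero_add]
    rw [List.foldl_map]
    apply PySem.List.foldl_congr_mem
    intro t vv _
    simp only [multi_closed]
    set off := offSumB vv (radicesB (3 * tl) vb) with hoff
    have e1 : ln + 0 * tl + off = ln + off := by ring
    have e2 : ln + 1 * tl + off = ln + off + tl := by ring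
    have e3 : (0 : Int) + 0 * tl + off = off := by ring
    simp only [e1, e2, e3]
    exact core_table (PySem.List.pyRange 0 ts 1) (ln + off) (ln + off + tl)
      (fun s => (s, ln + off + tl, 1)) (fun s => (s, off, -1)) t

-- ===== VERDICT (by name: the statement is the Claim_ definition above) =====
theorem add_repeat_spec : Claim_equal_add_repeat := by
  intro tt ln ts tl vb _ _
  unfold Spec_add_repeat
  exact add_eq tt ln ts tl vb
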